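-- pv_equiv track=rewrite | github.com/chrismannina/dbdoc | dbdoc/services/enhanced_context_builder.py | _extract_suffixes
-- ===== SOURCE A (Python) =====
-- from typing import List, Dict, Any, Optional, Set
--
-- def _extract_suffixes(names: List[str], min_count: int = 3) -> List[str]:
--     """Extract common suffixes from a list of names."""
--     suffix_counts = {}
--
--     common_suffixes = ['_id', '_key', '_date', '_time', '_flag', '_status', '_type', '_code', '_name']
--
--     for name in names:
--         for suffix in common_suffixes:
--             if name.endswith(suffix):
--                 suffix_counts[suffix] = suffix_counts.get(suffix, 0) + 1
--
--     return [suffix for suffix, count in suffix_counts.items() if count >= min_count]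
-- ===== SOURCE B (Python) =====
-- def _extract_suffixes(names, min_count=3):
--     """Extract common suffixes from a list of names (length-indexed tail lookup)."""
--     by_len = {
--         3: frozenset(['_id']),
--         4: frozenset(['_key']),
--         5: frozenset(['_date', '_time', '_flag', '_type', '_code', '_name']),
--         7: frozenset(['_status']),
--     }
--     counts = {}
--     for name in names:
--         for length, group in by_len.items():
--             tail = name[-length:]
--             if tail in group:
--                 counts[tail] = counts.get(tail, 0) + 1
--                 break
--     return [suffix for suffix, count in counts.items() if count >= min_count]
-- ===== Notes on version B (the rewrite author's own statement) =====
-- stated objective: alternative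
-- what changed: Replaces the inner scan over all nine suffixes with endswith tests by a length-indexed table: for each of the four distinct suffix lengths the name's tail slice is looked up in a frozenset, with a break on the first (necessarily unique) match.
import Mathlib
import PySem

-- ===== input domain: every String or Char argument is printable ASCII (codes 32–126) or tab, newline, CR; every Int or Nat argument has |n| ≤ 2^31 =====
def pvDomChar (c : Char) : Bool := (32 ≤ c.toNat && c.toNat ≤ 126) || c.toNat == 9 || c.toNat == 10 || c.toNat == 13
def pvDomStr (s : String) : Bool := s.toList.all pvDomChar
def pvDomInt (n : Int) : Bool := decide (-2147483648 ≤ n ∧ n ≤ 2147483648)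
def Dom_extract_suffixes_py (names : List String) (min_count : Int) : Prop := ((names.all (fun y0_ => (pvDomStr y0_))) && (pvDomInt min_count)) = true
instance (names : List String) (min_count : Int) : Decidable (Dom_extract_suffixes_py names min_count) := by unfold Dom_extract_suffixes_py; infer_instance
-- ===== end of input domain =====

-- B replaces the nine endswith tests per name by a length-indexed tail lookup (4 slices + set
-- membership, break on the unique match); objective: alternative (same result, different traversal).

-- ===== PORT A =====
def pvCommonSuffixes : List String :=
  ["_id", "_key", "_date", "_time", "_flag", "_status", "_type", "_code", "_name"]

def extract_suffixes_py (names : List String) (min_count : Int) : List String :=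
  let suffix_counts :=
    names.foldl (fun d name =>
      pvCommonSuffixes.foldl (fun d suffix =>
        if PySem.Str.endswith name suffix then d.insert suffix (d.getD suffix 0 + 1) else d) d)
      PySem.Dict.empty
  (suffix_counts.items.filter (fun p => min_count ≤ p.2)).map (·.1)

-- ===== PORT B =====
-- by_len: the four distinct suffix lengths, each with its frozenset of suffixes (PySem.Set = List of distinct elements)
def pvByLen : List (Int × List String) :=
  [(3, ["_id"]), (4, ["_key"]), (5, ["_date", "_time", "_flag", "_type", "_code", "_name"]),
   (7, ["_status"])]

-- the inner 'for length, group in by_len.items(): … break' loop of B, as structural recursion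
def pvTailMatch (name : String) (d : PySem.Dict String Int) :
    List (Int × List String) → PySem.Dict String Int
  | [] => d
  | (len, group) :: rest =>
    let tail := PySem.Str.slice name (some (-len)) none
    if group.contains tail then d.insert tail (d.getD tail 0 + 1)
    else pvTailMatch name d rest

def extract_suffixes_py_alt (names : List String) (min_count : Int) : List String :=
  let counts := names.foldl (fun d name => pvTailMatch name d pvByLen) PySem.Dict.empty
  (counts.items.filter (fun p => min_count ≤ p.2)).map (·.1)

-- ===== PRECONDITION & SPEC =====
def Spec_extract_suffixes_py (names : List String) (min_count : Int) (out : List String) : Prop := out = extract_suffixes_py_alt names min_count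
instance (names : List String) (min_count : Int) (out : List String) : Decidable (Spec_extract_suffixes_py names min_count out) := by unfold Spec_extract_suffixes_py; infer_instance

-- ===== CLAIM (what is proved, stated in full; the proofs are below) =====
def Claim_equal_extract_suffixes_py : Prop := ∀ (names : List String) (min_count : Int), Dom_extract_suffixes_py names min_count → Spec_extract_suffixes_py names min_count (extract_suffixes_py names min_count)

-- ===== LEMMAS AND PROOFS =====

-- the common abstraction of one name's effect on the counts dict: bump the (unique) matched suffix
def pvBump (d : PySem.Dict String Int) : Option String → PySem.Dict String Int
  | none => d
  | some s => d.insert s (d.getD s 0 + 1)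

-- no suffix in the table is a proper suffix of another
lemma pv_suffix_free :
    ∀ a ∈ pvCommonSuffixes, ∀ b ∈ pvCommonSuffixes, a ≠ b → ¬ (a.toList <:+ b.toList) := by
  decide

-- hence a name ends with at most one of the nine suffixes
lemma pv_unique (name : String) :
    ∀ a ∈ pvCommonSuffixes, ∀ b ∈ pvCommonSuffixes,
      PySem.Str.endswith name a = true → PySem.Str.endswith name b = true → a = b := by
  intro a ha b hb hea heb
  by_contra hne
  rw [PySem.Str.endswith_eq, PySem.Chars.endswith_iff] at hea heb
  rcases List.suffix_or_suffix_of_suffix hea heb with h | h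
  · exact pv_suffix_free a ha b hb hne h
  · exact pv_suffix_free b hb a ha (Ne.symm hne) h

lemma pv_drop_eq_iff (cs ss : List Char) (L : Nat) (hs : ss.length = L) :
    cs.drop (cs.length - L) = ss ↔ ss <:+ cs := by
  constructor
  · intro h; rw [← h]; exact List.drop_suffix _ _
  · rintro ⟨pre, rfl⟩
    have h1 : (pre ++ ss).length - L = pre.length := by simp [hs]
    rw [h1, List.drop_left]

-- the tail slice name[-k:] equals a length-k suffix s iff name endswith s
lemma pv_tail_spec (name s : String) (k : Nat) (hk : 0 < k) (hs : s.toList.length = k) :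
    (PySem.Str.slice name (some (-(k : Int))) none = s) ↔ PySem.Str.endswith name s = true := by
  have ht : (PySem.Str.slice name (some (-(k : Int))) none).toList
      = name.toList.drop (name.toList.length - k) := by
    simp [PySem.List.slice_from_neg_natCast name.toList k hk]
  rw [← String.toList_inj, ht, PySem.Str.endswith_eq, PySem.Chars.endswith_iff]
  exact pv_drop_eq_iff _ _ k hs

lemma pv_contains_iff (name : String) (k : Nat) (hk : 0 < k) (grp : List String)
    (hlen : ∀ s ∈ grp, s.toList.length = k) :
    (grp.contains (PySem.Str.slice name (some (-(k : Int))) none) = true)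
      ↔ ∃ s ∈ grp, PySem.Str.endswith name s = true := by
  rw [List.contains_iff_mem]
  constructor
  · intro h
    exact ⟨_, h, (pv_tail_spec name _ k hk (hlen _ h)).mp rfl⟩
  · rintro ⟨s, hsg, he⟩
    rw [(pv_tail_spec name s k hk (hlen s hsg)).mpr he]
    exact hsg

lemma pv_contains_false (name : String) (k : Nat) (hk : 0 < k) (grp : List String)
    (hlen : ∀ s ∈ grp, s.toList.length = k)
    (h : ∀ s ∈ grp, PySem.Str.endswith name s = false) :
    grp.contains (PySem.Str.slice name (some (-(k : Int))) none) = false := by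
  rw [Bool.eq_false_iff, Ne, pv_contains_iff name k hk grp hlen]
  rintro ⟨s, hsg, he⟩
  rw [h s hsg] at he
  exact Bool.false_ne_true he

-- A's inner loop over the suffix list is pvBump of the first (= only) match
lemma pv_foldA (name : String) :
    ∀ (ss : List String), ss.Nodup →
      (∀ a ∈ ss, ∀ b ∈ ss, PySem.Str.endswith name a = true →
        PySem.Str.endswith name b = true → a = b) →
      ∀ d : PySem.Dict String Int,
        ss.foldl (fun d suffix =>
            if PySem.Str.endswith name suffix then d.insert suffix (d.getD suffix 0 + 1) else d) d
          = pvBump d (ss.find? (fun s => PySem.Str.endswith name s))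
  | [], _, _, d => rfl
  | s :: rest, hnd, hu, d => by
    by_cases hs : PySem.Str.endswith name s = true
    · have hrest : ∀ t ∈ rest, PySem.Str.endswith name t = false := by
        intro t ht
        by_contra het
        rw [Bool.not_eq_false] at het
        have heq := hu s (List.mem_cons_self) t (List.mem_cons_of_mem _ ht) hs het
        exact (List.nodup_cons.mp hnd).1 (heq ▸ ht)
      rw [List.foldl_cons, if_pos hs, List.find?_cons_of_pos hs]
      rw [PySem.List.foldl_congr_mem _ _ (fun acc _ => acc) _
        (by intro acc x hx; rw [hrest x hx]; simp), PySem.List.foldl_ignore]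
      rfl
    · rw [List.foldl_cons, if_neg hs, List.find?_cons_of_neg hs]
      exact pv_foldA name rest (List.nodup_cons.mp hnd).2
        (fun a ha b hb => hu a (List.mem_cons_of_mem _ ha) b (List.mem_cons_of_mem _ hb)) d

-- a group not containing the (unique) matched suffix cannot contain the tail slice
lemma pv_contains_group (name s : String) (k : Nat) (hk : 0 < k) (grp : List String)
    (hlen : ∀ t ∈ grp, t.toList.length = k)
    (hsub : ∀ t ∈ grp, t ∈ pvCommonSuffixes)
    (hs_mem : s ∈ pvCommonSuffixes) (hs_end : PySem.Str.endswith name s = true)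
    (hnotin : s ∉ grp) :
    grp.contains (PySem.Str.slice name (some (-(k : Int))) none) = false := by
  refine pv_contains_false name k hk grp hlen (fun t ht => ?_)
  by_contra h
  rw [Bool.not_eq_false] at h
  have := pv_unique name t (hsub t ht) s hs_mem h hs_end
  exact hnotin (this ▸ ht)

-- B's inner loop is pvBump of the same match
lemma pv_foldB (name : String) (d : PySem.Dict String Int) :
    pvTailMatch name d pvByLen
      = pvBump d (pvCommonSuffixes.find? (fun s => PySem.Str.endswith name s)) := by
  have h3len : ∀ t ∈ (["_id"] : List String), t.toList.length = 3 := by decide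
  have h4len : ∀ t ∈ (["_key"] : List String), t.toList.length = 4 := by decide
  have h5len : ∀ t ∈ (["_date", "_time", "_flag", "_type", "_code", "_name"] : List String),
      t.toList.length = 5 := by decide
  have h7len : ∀ t ∈ (["_status"] : List String), t.toList.length = 7 := by decide
  have h3sub : ∀ t ∈ (["_id"] : List String), t ∈ pvCommonSuffixes := by decide
  have h4sub : ∀ t ∈ (["_key"] : List String), t ∈ pvCommonSuffixes := by decide
  have h5sub : ∀ t ∈ (["_date", "_time", "_flag", "_type", "_code", "_name"] : List String),
      t ∈ pvCommonSuffixes := by decide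
  have h7sub : ∀ t ∈ (["_status"] : List String), t ∈ pvCommonSuffixes := by decide
  simp only [pvTailMatch, pvByLen]
  rw [show (-3 : Int) = -((3 : Nat) : Int) by norm_num,
      show (-4 : Int) = -((4 : Nat) : Int) by norm_num,
      show (-5 : Int) = -((5 : Nat) : Int) by norm_num,
      show (-7 : Int) = -((7 : Nat) : Int) by norm_num]
  rcases hf : pvCommonSuffixes.find? (fun s => PySem.Str.endswith name s) with _ | s
  · have hall : ∀ t ∈ pvCommonSuffixes, PySem.Str.endswith name t = false := by
      intro t htm
      have := List.find?_eq_none.mp hf t htm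
      simpa using this
    rw [pv_contains_false name 3 (by norm_num) _ h3len (fun t ht => hall t (h3sub t ht)),
        pv_contains_false name 4 (by norm_num) _ h4len (fun t ht => hall t (h4sub t ht)),
        pv_contains_false name 5 (by norm_num) _ h5len (fun t ht => hall t (h5sub t ht)),
        pv_contains_false name 7 (by norm_num) _ h7len (fun t ht => hall t (h7sub t ht))]
    simp [pvBump]
  · have hs_mem : s ∈ pvCommonSuffixes := List.mem_of_find?_eq_some hf
    have hs_end : PySem.Str.endswith name s = true := List.find?_some hf
    have hs_mem' : s ∈ (["_id", "_key", "_date", "_time", "_flag", "_status", "_type",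
        "_code", "_name"] : List String) := hs_mem
    fin_cases hs_mem'
    · -- "_id"
      rw [(pv_contains_iff name 3 (by norm_num) _ h3len).mpr ⟨"_id", by decide, hs_end⟩,
          (pv_tail_spec name "_id" 3 (by norm_num) (by decide)).mpr hs_end]
      simp [pvBump]
    · -- "_key"
      rw [pv_contains_group name "_key" 3 (by norm_num) _ h3len h3sub hs_mem hs_end (by decide),
          (pv_contains_iff name 4 (by norm_num) _ h4len).mpr ⟨"_key", by decide, hs_end⟩,
          (pv_tail_spec name "_key" 4 (by norm_num) (by decide)).mpr hs_end]
      simp [pvBump]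
    · -- "_date"
      rw [pv_contains_group name "_date" 3 (by norm_num) _ h3len h3sub hs_mem hs_end (by decide),
          pv_contains_group name "_date" 4 (by norm_num) _ h4len h4sub hs_mem hs_end (by decide),
          (pv_contains_iff name 5 (by norm_num) _ h5len).mpr ⟨"_date", by decide, hs_end⟩,
          (pv_tail_spec name "_date" 5 (by norm_num) (by decide)).mpr hs_end]
      simp [pvBump]
    · -- "_time"
      rw [pv_contains_group name "_time" 3 (by norm_num) _ h3len h3sub hs_mem hs_end (by decide),
          pv_contains_group name "_time" 4 (by norm_num) _ h4len h4sub hs_mem hs_end (by decide),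
          (pv_contains_iff name 5 (by norm_num) _ h5len).mpr ⟨"_time", by decide, hs_end⟩,
          (pv_tail_spec name "_time" 5 (by norm_num) (by decide)).mpr hs_end]
      simp [pvBump]
    · -- "_flag"
      rw [pv_contains_group name "_flag" 3 (by norm_num) _ h3len h3sub hs_mem hs_end (by decide),
          pv_contains_group name "_flag" 4 (by norm_num) _ h4len h4sub hs_mem hs_end (by decide),
          (pv_contains_iff name 5 (by norm_num) _ h5len).mpr ⟨"_flag", by decide, hs_end⟩,
          (pv_tail_spec name "_flag" 5 (by norm_num) (by decide)).mpr hs_end]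
      simp [pvBump]
    · -- "_status"
      rw [pv_contains_group name "_status" 3 (by norm_num) _ h3len h3sub hs_mem hs_end (by decide),
          pv_contains_group name "_status" 4 (by norm_num) _ h4len h4sub hs_mem hs_end (by decide),
          pv_contains_group name "_status" 5 (by norm_num) _ h5len h5sub hs_mem hs_end (by decide),
          (pv_contains_iff name 7 (by norm_num) _ h7len).mpr ⟨"_status", by decide, hs_end⟩,
          (pv_tail_spec name "_status" 7 (by norm_num) (by decide)).mpr hs_end]
      simp [pvBump]
    · -- "_type"
      rw [pv_contains_group name "_type" 3 (by norm_num) _ h3len h3sub hs_mem hs_end (by decide),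
          pv_contains_group name "_type" 4 (by norm_num) _ h4len h4sub hs_mem hs_end (by decide),
          (pv_contains_iff name 5 (by norm_num) _ h5len).mpr ⟨"_type", by decide, hs_end⟩,
          (pv_tail_spec name "_type" 5 (by norm_num) (by decide)).mpr hs_end]
      simp [pvBump]
    · -- "_code"
      rw [pv_contains_group name "_code" 3 (by norm_num) _ h3len h3sub hs_mem hs_end (by decide),
          pv_contains_group name "_code" 4 (by norm_num) _ h4len h4sub hs_mem hs_end (by decide),
          (pv_contains_iff name 5 (by norm_num) _ h5len).mpr ⟨"_code", by decide, hs_end⟩,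
          (pv_tail_spec name "_code" 5 (by norm_num) (by decide)).mpr hs_end]
      simp [pvBump]
    · -- "_name"
      rw [pv_contains_group name "_name" 3 (by norm_num) _ h3len h3sub hs_mem hs_end (by decide),
          pv_contains_group name "_name" 4 (by norm_num) _ h4len h4sub hs_mem hs_end (by decide),
          (pv_contains_iff name 5 (by norm_num) _ h5len).mpr ⟨"_name", by decide, hs_end⟩,
          (pv_tail_spec name "_name" 5 (by norm_num) (by decide)).mpr hs_end]
      simp [pvBump]

lemma pv_per_name (name : String) (d : PySem.Dict String Int) :
    pvCommonSuffixes.foldl (fun d suffix =>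
        if PySem.Str.endswith name suffix then d.insert suffix (d.getD suffix 0 + 1) else d) d
      = pvTailMatch name d pvByLen := by
  rw [pv_foldA name pvCommonSuffixes (by decide) (pv_unique name) d, pv_foldB]

-- ===== VERDICT (by name: the statement is the Claim_ definition above) =====
theorem extract_suffixes_py_spec : Claim_equal_extract_suffixes_py := by
  intro names min_count _
  have h : names.foldl (fun d name =>
        pvCommonSuffixes.foldl (fun d suffix =>
          if PySem.Str.endswith name suffix then d.insert suffix (d.getD suffix 0 + 1) else d) d)
        PySem.Dict.empty
      = names.foldl (fun d name => pvTailMatch name d pvByLen) PySem.Dict.empty :=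
    PySem.List.foldl_congr_mem _ _ _ _ (fun acc x _ => pv_per_name x acc)
  unfold Spec_extract_suffixes_py extract_suffixes_py extract_suffixes_py_alt
  simp only [h]
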